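-- pv_equiv track=rewrite | github.com/Epiconcept-Paris/deep.piste | dpiste/tools/tmp.py | remove_false_positives
-- ===== SOURCE A (Python) =====
-- def remove_false_positives(allpaths: list) -> list:
--     index2rm = []
--     for a in range(len(allpaths)):
--         do_rm = True
--         for i in range(1, len(allpaths[a])):
--             if count_diff_btw_str(allpaths[a][i], allpaths[a][i-1]) != 1:
--                 do_rm = False
--         if do_rm:
--             index2rm.append(a)
--     for i, index in enumerate(sorted(index2rm)):
--         allpaths.pop(index - i)
--     return allpaths
--
-- def count_diff_btw_str(s1, s2):
--     return sum(1 for a, b in zip(s1, s2) if a != b) + abs(len(s1) - len(s2))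
-- ===== SOURCE B (Python) =====
-- def count_diff_btw_str(s1, s2):
--     return sum(a != b for a, b in zip(s1, s2)) + abs(len(s1) - len(s2))
--
-- def remove_false_positives(allpaths: list) -> list:
--     kept = [p for p in allpaths
--             if not all(count_diff_btw_str(y, x) == 1 for x, y in zip(p, p[1:]))]
--     allpaths[:] = kept
--     return allpaths
-- ===== Notes on version B (the rewrite author's own statement) =====
-- stated objective: simpler
-- what changed: Instead of collecting removal indices and popping each with the shifting index-i offset, B decides per path whether to keep it (some consecutive pair differs by != 1 char) and writes the kept list back in place with one slice assignment.
import Mathlib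
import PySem

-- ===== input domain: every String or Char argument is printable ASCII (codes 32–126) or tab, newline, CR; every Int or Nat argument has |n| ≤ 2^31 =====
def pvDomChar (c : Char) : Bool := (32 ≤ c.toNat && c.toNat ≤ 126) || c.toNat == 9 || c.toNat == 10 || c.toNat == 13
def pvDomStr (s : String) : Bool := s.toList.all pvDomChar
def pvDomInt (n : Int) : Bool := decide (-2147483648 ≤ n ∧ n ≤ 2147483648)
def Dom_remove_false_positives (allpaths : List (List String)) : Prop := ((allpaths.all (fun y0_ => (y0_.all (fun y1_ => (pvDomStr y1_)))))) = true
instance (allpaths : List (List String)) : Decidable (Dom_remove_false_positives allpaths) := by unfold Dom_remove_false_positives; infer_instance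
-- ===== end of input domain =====

-- B in Source B mutates the argument in place (slice assignment) exactly as A's pops do; this file's
-- equivalence is about the RETURN value. B is simpler: it keeps paths directly instead of
-- collecting removal indices and popping with a shifting offset.

-- ===== PORT A =====
-- count_diff_btw_str of A: sum(1 for a,b in zip(s1,s2) if a != b) + abs(len(s1)-len(s2))
def pvCountDiffA (s1 s2 : String) : Int :=
  ((s1.toList.zip s2.toList).foldl (fun n p => if p.1 ≠ p.2 then n + 1 else n) 0)
    + |PySem.Str.len s1 - PySem.Str.len s2|

-- the inner loop of A: do_rm after 'for i in range(1, len(p)): if count_diff(...)!=1: do_rm=False'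
def pvDoRmA (p : List String) : Bool :=
  (PySem.List.pyRange 1 (p.length : Int) 1).foldl
    (fun d i =>
      if pvCountDiffA (PySem.List.pyGetD p i "") (PySem.List.pyGetD p (i - 1) "") ≠ 1 then false else d)
    true

def remove_false_positives (allpaths : List (List String)) : List (List String) :=
  let index2rm : List Int :=
    (PySem.List.pyRange 0 (allpaths.length : Int) 1).foldl
      (fun acc a => if pvDoRmA (PySem.List.pyGetD allpaths a []) then acc ++ [a] else acc) []
  (PySem.List.enumerate (PySem.List.sorted index2rm (fun x => x) false) 0).foldl
    (fun l pr =>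
      match PySem.List.pop? l (pr.2 - pr.1) with
      | some (_, l') => l'
      | none => l)   -- unreachable: every popped index is in range (Python would raise IndexError)
    allpaths

-- ===== PORT B =====
-- count_diff_btw_str of B: sum(a != b for a, b in zip(s1, s2)) + abs(len(s1)-len(s2))
def pvCountDiffB (s1 s2 : String) : Int :=
  ((s1.toList.zip s2.toList).foldl (fun n p => n + (if p.1 ≠ p.2 then 1 else 0)) 0)
    + |PySem.Str.len s1 - PySem.Str.len s2|

-- all(count_diff_btw_str(y, x) == 1 for x, y in zip(p, p[1:]))
def pvAllOneB (p : List String) : Bool :=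
  (p.zip (PySem.List.slice p (some 1) none)).all (fun q => pvCountDiffB q.2 q.1 == 1)

def remove_false_positives_alt (allpaths : List (List String)) : List (List String) :=
  allpaths.filter (fun p => !pvAllOneB p)

-- ===== PRECONDITION & SPEC =====
def Spec_remove_false_positives (allpaths : List (List String)) (out : List (List String)) : Prop := out = remove_false_positives_alt allpaths
instance (allpaths : List (List String)) (out : List (List String)) : Decidable (Spec_remove_false_positives allpaths out) := by unfold Spec_remove_false_positives; infer_instance

-- ===== CLAIM (what is proved, stated in full; the proofs are below) =====
def Claim_equal_remove_false_positives : Prop := ∀ (allpaths : List (List String)), Dom_remove_false_positives allpaths → Spec_remove_false_positives allpaths (remove_false_positives allpaths)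

-- ===== LEMMAS AND PROOFS =====
-- 1: the two count_diff helpers agree
lemma pv_cnt_eq (s1 s2 : String) : pvCountDiffA s1 s2 = pvCountDiffB s1 s2 := by
  unfold pvCountDiffA pvCountDiffB
  congr 2
  funext n p
  by_cases h : p.1 = p.2 <;> simp [h]

-- 2: A's flag-clearing fold is an 'all'
lemma pv_foldl_if_false (P : Int → Prop) [DecidablePred P] (l : List Int) (b : Bool) :
    l.foldl (fun d i => if P i then false else d) b = (b && l.all (fun i => !decide (P i))) := by
  induction l generalizing b with
  | nil => simp
  | cons x xs ih =>
    rw [List.foldl_cons]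
    by_cases h : P x
    · rw [if_pos h, ih]; simp [h]
    · rw [if_neg h, ih]; simp [h]

-- 3a: index shift of the loop body under a cons
lemma pv_shift (g : String → String → Bool) (x y : String) (ys : List String) (k : Nat) :
    g (PySem.List.pyGetD (x :: y :: ys) ((1 : Int) + ((k + 1 : Nat) : Int)) "")
      (PySem.List.pyGetD (x :: y :: ys) ((1 : Int) + ((k + 1 : Nat) : Int) - 1) "")
    = g (PySem.List.pyGetD (y :: ys) ((1 : Int) + (k : Nat)) "")
      (PySem.List.pyGetD (y :: ys) ((1 : Int) + (k : Nat) - 1) "") := by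
  have e1 : (1 : Int) + ((k + 1 : Nat) : Int) = ((k + 2 : Nat) : Int) := by omega
  have e2 : (1 : Int) + ((k + 1 : Nat) : Int) - 1 = ((k + 1 : Nat) : Int) := by omega
  have e3 : (1 : Int) + ((k : Nat) : Int) = ((k + 1 : Nat) : Int) := by omega
  have e4 : (1 : Int) + ((k : Nat) : Int) - 1 = ((k : Nat) : Int) := by omega
  rw [e2, e1, e4, e3, PySem.List.pyGetD_natCast, PySem.List.pyGetD_natCast,
    PySem.List.pyGetD_natCast, PySem.List.pyGetD_natCast]
  simp

-- 3b: the 'for i in range(1, len(p))' consecutive-pair test as a zip over p, p[1:]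
lemma pv_allRange (g : String → String → Bool) : ∀ (xs : List String) (x : String),
    ((List.range xs.length).map (fun k => (1 : Int) + (k : Nat))).all
      (fun i => g (PySem.List.pyGetD (x :: xs) i "") (PySem.List.pyGetD (x :: xs) (i - 1) ""))
    = ((x :: xs).zip xs).all (fun q => g q.2 q.1) := by
  intro xs
  induction xs with
  | nil => intro x; simp
  | cons y ys ih =>
    intro x
    simp only [List.length_cons]
    rw [List.range_succ_eq_map]
    simp only [List.map_cons, List.all_cons, List.map_map]
    have h1 : (PySem.List.pyGetD (x :: y :: ys) ((1 : Int) + ((0 : Nat) : Int)) "") = y := by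
      have e : (1 : Int) + ((0 : Nat) : Int) = ((1 : Nat) : Int) := by norm_num
      rw [e, PySem.List.pyGetD_natCast]
      all_goals rfl
    have h0 : (PySem.List.pyGetD (x :: y :: ys) ((1 : Int) + ((0 : Nat) : Int) - 1) "") = x := by
      have e : (1 : Int) + ((0 : Nat) : Int) - 1 = ((0 : Nat) : Int) := by norm_num
      rw [e, PySem.List.pyGetD_natCast]
      all_goals rfl
    rw [List.zip_cons_cons, List.all_cons]
    rw [h1, h0]
    congr 1
    rw [← ih y, List.all_map, List.all_map]
    apply List.all_congr rfl
    intro k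
    simpa using pv_shift g x y ys k

-- 4: the two keep/remove predicates agree
lemma pv_rm_eq (p : List String) : pvDoRmA p = pvAllOneB p := by
  cases p with
  | nil => simp [pvDoRmA, pvAllOneB, PySem.List.pyRange_one_eq_nil]
  | cons x xs =>
    unfold pvDoRmA pvAllOneB
    rw [pv_foldl_if_false (fun i => pvCountDiffA (PySem.List.pyGetD (x :: xs) i "") (PySem.List.pyGetD (x :: xs) (i - 1) "") ≠ 1)]
    rw [Bool.true_and]
    rw [PySem.List.slice_from_one, List.tail_cons]
    rw [← pv_allRange (fun a b => pvCountDiffB a b == 1) xs x]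
    rw [PySem.List.pyRange_one]
    have hl : (((x :: xs).length : Int) - 1).toNat = xs.length := by simp
    rw [hl]
    apply List.all_congr rfl
    intro i
    simp only [pv_cnt_eq, ne_eq, decide_not, Bool.not_not]
    exact (Bool.beq_eq_decide_eq _ _).symm

-- 5: the removal indices of A, in Nat form
def pvIdx (xs : List (List String)) : List Nat :=
  (List.range xs.length).filter (fun k => pvDoRmA (xs.getD k []))

lemma pv_idx_cons (x : List String) (xs : List (List String)) :
    pvIdx (x :: xs) = if pvDoRmA x then 0 :: (pvIdx xs).map (· + 1) else (pvIdx xs).map (· + 1) := by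
  unfold pvIdx
  simp only [List.length_cons]
  rw [List.range_succ_eq_map, List.filter_cons, List.filter_map]
  by_cases h : pvDoRmA x
  · simp [h, Function.comp_def, Nat.succ_eq_add_one]
  · simp [h, Function.comp_def, Nat.succ_eq_add_one]

-- 6: A's index2rm fold equals pvIdx, cast to Int
lemma pv_index2rm_eq (xs : List (List String)) :
    (PySem.List.pyRange 0 (xs.length : Int) 1).foldl
      (fun acc a => if pvDoRmA (PySem.List.pyGetD xs a []) then acc ++ [a] else acc) []
    = (pvIdx xs).map (fun (k : Nat) => (k : Int)) := by
  rw [PySem.List.foldl_append_if_eq_filter (fun a => pvDoRmA (PySem.List.pyGetD xs a []))]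
  rw [PySem.List.pyRange_one]
  simp only [List.nil_append, Int.sub_zero, Int.toNat_natCast]
  rw [List.filter_map]
  unfold pvIdx
  have hf : List.filter ((fun a => pvDoRmA (PySem.List.pyGetD xs a [])) ∘ fun k => (0 : Int) + (k : Nat))
      (List.range xs.length) = List.filter (fun k => pvDoRmA (xs.getD k [])) (List.range xs.length) := by
    apply List.filter_congr
    intro k hk
    simp [Function.comp, PySem.List.pyGetD_natCast]
  rw [hf]
  simp

-- 7: A's index list is already sorted
lemma pv_sorted_eq (xs : List (List String)) :
    PySem.List.sorted ((pvIdx xs).map (fun (k : Nat) => (k : Int))) (fun x => x) false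
      = (pvIdx xs).map (fun (k : Nat) => (k : Int)) := by
  refine PySem.List.sorted_eq_self_of_pairwise _ _ ?_
  rw [List.pairwise_map]
  refine (List.Pairwise.filter _ List.pairwise_lt_range).imp ?_
  intro a b hab
  exact_mod_cast le_of_lt hab

-- 8: the pop loop removes exactly the indexed elements
lemma pv_popLem : ∀ (xs K : List (List String)) (d : Nat),
    (PySem.List.enumerate ((pvIdx xs).map (fun k => ((K.length + d + k : Nat) : Int))) (d : Int)).foldl
      (fun l pr => match PySem.List.pop? l (pr.2 - pr.1) with
        | some (_, l') => l'
        | none => l) (K ++ xs)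
    = K ++ xs.filter (fun p => !pvDoRmA p) := by
  intro xs
  induction xs with
  | nil => intro K d; simp [pvIdx, PySem.List.enumerate_nil]
  | cons x xs ih =>
    intro K d
    rw [pv_idx_cons]
    by_cases h : pvDoRmA x
    · rw [if_pos h]
      simp only [List.map_cons, List.map_map]
      rw [PySem.List.enumerate_cons, List.foldl_cons]
      have hidx : ((K.length + d + 0 : Nat) : Int) - (d : Int) = ((K.length : Nat) : Int) := by
        push_cast; ring
      have hlt : K.length < (K ++ x :: xs).length := by simp
      rw [hidx, PySem.List.pop?_natCast _ _ hlt]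
      have her : (K ++ x :: xs).eraseIdx K.length = K ++ xs := by
        simp [List.eraseIdx_append_of_length_le]
      simp only [her]
      have hfun : ((fun k => ((K.length + d + k : Nat) : Int)) ∘ (· + 1))
          = (fun k => ((K.length + (d + 1) + k : Nat) : Int)) := by
        funext k; simp only [Function.comp]; congr 1; omega
      have hd1 : (d : Int) + 1 = ((d + 1 : Nat) : Int) := by push_cast; ring
      rw [hfun, hd1, ih K (d + 1)]
      simp [h]
    · rw [if_neg h]
      simp only [List.map_map]
      have hfun : ((fun k => ((K.length + d + k : Nat) : Int)) ∘ (· + 1))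
          = (fun k => (((K ++ [x]).length + d + k : Nat) : Int)) := by
        funext k; simp only [Function.comp]; congr 1; simp; omega
      rw [hfun]
      have happ : K ++ x :: xs = (K ++ [x]) ++ xs := by simp
      rw [happ, ih (K ++ [x]) d]
      simp [h]

-- 9: assembled equivalence
lemma pv_main (allpaths : List (List String)) :
    remove_false_positives allpaths = remove_false_positives_alt allpaths := by
  unfold remove_false_positives remove_false_positives_alt
  rw [pv_index2rm_eq]
  show (PySem.List.enumerate (PySem.List.sorted ((pvIdx allpaths).map (fun (k : Nat) => (k : Int))) (fun x => x) false) 0).foldl _ allpaths = _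
  rw [pv_sorted_eq]
  have hmap : (pvIdx allpaths).map (fun (k : Nat) => (k : Int))
      = (pvIdx allpaths).map (fun (k : Nat) => ((([] : List (List String)).length + 0 + k : Nat) : Int)) := by
    simp
  rw [hmap]
  have h0 : (0 : Int) = ((0 : Nat) : Int) := rfl
  rw [h0]
  have hpl := pv_popLem allpaths [] 0
  simp only [List.nil_append] at hpl
  rw [hpl]
  apply List.filter_congr
  intro p hp
  rw [pv_rm_eq]

-- ===== VERDICT (by name: the statement is the Claim_ definition above) =====
theorem remove_false_positives_spec : Claim_equal_remove_false_positives := by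
  intro allpaths _
  unfold Spec_remove_false_positives
  exact pv_main allpaths
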